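-- pv_equiv track=rewrite | github.com/fbittmann/Pythonbook | Code and solutions/2_sudoku.py | gewonnen
-- ===== SOURCE A (Python) =====
-- def subcheck(data, rowsec, colsec):
-- 	"""Are the numbers from 1-9 unique in a 3x3 subsection?"""
-- 	subsec = []
-- 	for row in range(3 * rowsec, 3 * rowsec + 3):
-- 		for col in range(3 * colsec, 3 * colsec + 3):
-- 			subsec.append(data[row][col])
-- 	for i in range(1, 10):
-- 		if i not in subsec:
-- 			return False
-- 	return True
--
-- def spaltengen(data, col):
-- 	"""Gets a column from the matrix"""
-- 	neuspalte = []
-- 	for row in data: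
-- 		neuspalte.append(row[col])
-- 	return neuspalte
--
-- def gewonnen(data):
-- 	"""Tests if the game is won"""
-- 	#Zeilentest
-- 	for row in data:
-- 		for x in range(1, 10):
-- 			if x in row:
-- 				continue
-- 			else:
-- 				return False
-- 	#Spaltentest
-- 	for y in range(0, 9):
-- 		for i in range(1, 10):
-- 			if i in spaltengen(data, y):
-- 				continue
-- 			else:
-- 				return False
--
-- 	#Sektionetest
-- 	for x in range(3):
-- 		for y in range(3):
-- 			if subcheck(data, x, y) == False:
-- 				return False
-- 	return True
-- ===== SOURCE B (Python) =====
-- def gewonnen(data):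
-- 	"""Tests if the game is won"""
-- 	FULL = 0b1111111110  # bits 1..9 set
-- 	ok = True
-- 	cols = {}
-- 	boxes = {}
-- 	for r, row in enumerate(data):
-- 		m = 0
-- 		for c, v in enumerate(row):
-- 			if 1 <= v <= 9:
-- 				bit = 1 << v
-- 				m |= bit
-- 				cols[c] = cols.get(c, 0) | bit
-- 				key = (r // 3, c // 3)
-- 				boxes[key] = boxes.get(key, 0) | bit
-- 		ok = ok and m == FULL
-- 	return (ok
-- 		and all(cols.get(c, 0) == FULL for c in range(9))
-- 		and all(boxes.get((x, y), 0) == FULL for x in range(3) for y in range(3)))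
-- ===== Notes on version B (the rewrite author's own statement) =====
-- stated objective: alternative
-- what changed: Replaces A's staged per-unit rescans (per-row membership loops, spaltengen column extraction, subcheck box gathering) by a single pass over all cells that accumulates a bitmask per row and dicts of column/box bitmasks, then compares each mask to 0b1111111110.
import Mathlib
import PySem

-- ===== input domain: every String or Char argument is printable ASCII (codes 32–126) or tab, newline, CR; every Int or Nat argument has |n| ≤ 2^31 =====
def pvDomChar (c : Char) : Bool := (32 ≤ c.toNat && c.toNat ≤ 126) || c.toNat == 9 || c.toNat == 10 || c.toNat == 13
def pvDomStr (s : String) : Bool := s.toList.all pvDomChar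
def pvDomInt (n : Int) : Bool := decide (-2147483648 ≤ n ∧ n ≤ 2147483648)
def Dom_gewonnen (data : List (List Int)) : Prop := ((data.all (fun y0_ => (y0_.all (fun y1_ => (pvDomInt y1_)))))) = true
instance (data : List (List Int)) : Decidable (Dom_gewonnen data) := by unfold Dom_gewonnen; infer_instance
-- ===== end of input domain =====

-- B replaces A's staged per-unit rescans (row membership loops, spaltengen column extraction,
-- subcheck box gathering) by ONE pass over all cells accumulating bitmasks (per-row mask, dicts
-- of column and box masks), each finally compared to 0b1111111110 (objective: alternative).


-- ===== PORT A =====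
-- row[col] / data[row][col]: Python would raise on an out-of-range index; A only ever
-- evaluates these with in-range indices (guarded by the earlier tests), so `.getD` never fires.
def spaltengenA (data : List (List Int)) (col : Int) : List Int :=
  data.foldl (fun acc row => acc ++ [(PySem.List.pyGet? row col).getD 0]) []

def subcheckA (data : List (List Int)) (rowsec colsec : Int) : Bool :=
  let subsec := (PySem.List.pyRange (3 * rowsec) (3 * rowsec + 3) 1).foldl (fun acc row =>
    (PySem.List.pyRange (3 * colsec) (3 * colsec + 3) 1).foldl (fun acc2 col =>
      acc2 ++ [((PySem.List.pyGet? ((PySem.List.pyGet? data row).getD []) col).getD 0)]) acc) []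
  (PySem.List.pyRange 1 10 1).all (fun i => subsec.contains i)

def gewonnen (data : List (List Int)) : Bool :=
  if data.all (fun row => (PySem.List.pyRange 1 10 1).all (fun x => row.contains x)) then
    if (PySem.List.pyRange 0 9 1).all (fun y =>
        (PySem.List.pyRange 1 10 1).all (fun i => (spaltengenA data y).contains i)) then
      if (PySem.List.pyRange 0 3 1).all (fun x =>
          (PySem.List.pyRange 0 3 1).all (fun y => !(subcheckA data x y == false))) then
        true
      else false
    else false
  else false

-- ===== PORT B =====
-- one pass over all cells; the masks are ORs of bits 1 << v with 1 ≤ v ≤ 9, hence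
-- nonnegative in Python: they are ported as Nat (exact).
-- inner loop body: `for c, v in enumerate(row): if 1 <= v <= 9: ...`
def altInnerStep (r : Int)
    (st2 : Nat × PySem.Dict Int Nat × PySem.Dict (Int × Int) Nat) (cv : Int × Int) :
    Nat × PySem.Dict Int Nat × PySem.Dict (Int × Int) Nat :=
  if 1 ≤ cv.2 ∧ cv.2 ≤ 9 then
    let bit : Nat := 1 <<< cv.2.toNat
    let key := (PySem.Int.floordiv r 3, PySem.Int.floordiv cv.1 3)
    (st2.1 ||| bit,
     st2.2.1.insert cv.1 (st2.2.1.getD cv.1 0 ||| bit),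
     st2.2.2.insert key (st2.2.2.getD key 0 ||| bit))
  else st2

-- outer loop body: `for r, row in enumerate(data): m = 0; ...; ok = ok and m == FULL`
def altOuterStep (st : Bool × PySem.Dict Int Nat × PySem.Dict (Int × Int) Nat)
    (rrow : Int × List Int) : Bool × PySem.Dict Int Nat × PySem.Dict (Int × Int) Nat :=
  let st2 := (PySem.List.enumerate rrow.2 0).foldl (altInnerStep rrow.1) (0, st.2.1, st.2.2)
  (st.1 && (st2.1 == 1022), st2.2.1, st2.2.2)

def gewonnen_alt (data : List (List Int)) : Bool :=
  let st := (PySem.List.enumerate data 0).foldl altOuterStep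
    (true, PySem.Dict.empty, PySem.Dict.empty)
  st.1
    && (PySem.List.pyRange 0 9 1).all (fun c => st.2.1.getD c 0 == 1022)
    && (PySem.List.pyRange 0 3 1).all (fun x =>
         (PySem.List.pyRange 0 3 1).all (fun y => st.2.2.getD (x, y) 0 == 1022))

-- ===== PRECONDITION & SPEC =====
def Spec_gewonnen (data : List (List Int)) (out : Bool) : Prop := out = gewonnen_alt data
instance (data : List (List Int)) (out : Bool) : Decidable (Spec_gewonnen data out) := by unfold Spec_gewonnen; infer_instance

-- ===== CLAIM (what is proved, stated in full; the proofs are below) =====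
def Claim_equal_gewonnen : Prop := ∀ (data : List (List Int)), Dom_gewonnen data → Spec_gewonnen data (gewonnen data)

-- ===== LEMMAS AND PROOFS =====

-- proof-side reference functions for the masks B accumulates
def pvBit (v : Int) : Nat := if 1 ≤ v ∧ v ≤ 9 then 1 <<< v.toNat else 0

def pvRowMask (row : List Int) : Nat := row.foldl (fun m v => m ||| pvBit v) 0

def pvColAcc (k : Int) (row : List Int) : Nat :=
  (PySem.List.enumerate row 0).foldl
    (fun m p => m ||| (if p.1 = k then pvBit p.2 else 0)) 0

def pvColMask (data : List (List Int)) (k : Int) : Nat :=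
  data.foldl (fun m row => m ||| pvColAcc k row) 0

def pvBoxAcc (kb : Int × Int) (r : Int) (row : List Int) : Nat :=
  (PySem.List.enumerate row 0).foldl
    (fun m p => m ||| (if (PySem.Int.floordiv r 3, PySem.Int.floordiv p.1 3) = kb then pvBit p.2 else 0)) 0

def pvBoxMask (data : List (List Int)) (kb : Int × Int) : Nat :=
  (PySem.List.enumerate data 0).foldl (fun m rp => m ||| pvBoxAcc kb rp.1 rp.2) 0

-- the dict components of the inner fold, in isolation
def pvColsStep (d : PySem.Dict Int Nat) (p : Int × Int) : PySem.Dict Int Nat :=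
  if 1 ≤ p.2 ∧ p.2 ≤ 9 then d.insert p.1 (d.getD p.1 0 ||| (1 <<< p.2.toNat)) else d

def pvBoxesStep (r : Int) (d : PySem.Dict (Int × Int) Nat) (p : Int × Int) :
    PySem.Dict (Int × Int) Nat :=
  if 1 ≤ p.2 ∧ p.2 ≤ 9 then
    d.insert (PySem.Int.floordiv r 3, PySem.Int.floordiv p.1 3)
      (d.getD (PySem.Int.floordiv r 3, PySem.Int.floordiv p.1 3) 0 ||| (1 <<< p.2.toNat))
  else d

theorem pv_lor_out {E : Type} (f : Nat → E → Nat) (t : E → Nat)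
    (hf : ∀ m e, f m e = m ||| t e) (l : List E) (a : Nat) :
    l.foldl f a = a ||| l.foldl f 0 := by
  induction l generalizing a with
  | nil => simp
  | cons e es ih =>
    rw [List.foldl_cons, List.foldl_cons, hf, hf, ih (a ||| t e), ih (0 ||| t e)]
    simp [Nat.lor_assoc]

theorem pv_inner_char (r : Int) (l : List (Int × Int))
    (m : Nat) (cols : PySem.Dict Int Nat) (boxes : PySem.Dict (Int × Int) Nat) :
    l.foldl (altInnerStep r) (m, cols, boxes)
      = (m ||| l.foldl (fun m p => m ||| pvBit p.2) 0,
         l.foldl pvColsStep cols,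
         l.foldl (pvBoxesStep r) boxes) := by
  induction l generalizing m cols boxes with
  | nil => simp
  | cons p ps ih =>
    simp only [List.foldl_cons, altInnerStep]
    by_cases h : 1 ≤ p.2 ∧ p.2 ≤ 9
    · rw [if_pos h, ih]
      have hb : pvBit p.2 = 1 <<< p.2.toNat := by simp [pvBit, h]
      congr 1
      · rw [pv_lor_out (fun m (q : Int × Int) => m ||| pvBit q.2) _ (fun _ _ => rfl) ps
            (0 ||| pvBit p.2)]
        simp [hb, Nat.lor_assoc]
      · congr 1
        · simp only [pvColsStep, if_pos h]
        · simp only [pvBoxesStep, if_pos h]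
    · rw [if_neg h, ih]
      have hb : pvBit p.2 = 0 := by simp [pvBit, h]
      congr 1
      · rw [pv_lor_out (fun m (q : Int × Int) => m ||| pvBit q.2) _ (fun _ _ => rfl) ps
            (0 ||| pvBit p.2)]
        simp [hb]
      · congr 1
        · simp only [pvColsStep, if_neg h]
        · simp only [pvBoxesStep, if_neg h]

theorem pv_colsFold_getD (l : List (Int × Int)) (cols : PySem.Dict Int Nat) (k : Int) :
    (l.foldl pvColsStep cols).getD k 0
      = cols.getD k 0 ||| l.foldl (fun m p => m ||| (if p.1 = k then pvBit p.2 else 0)) 0 := by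
  induction l generalizing cols with
  | nil => simp
  | cons p ps ih =>
    simp only [List.foldl_cons]
    rw [ih]
    rw [pv_lor_out (fun m (q : Int × Int) => m ||| (if q.1 = k then pvBit q.2 else 0)) _
      (fun _ _ => rfl) ps (0 ||| (if p.1 = k then pvBit p.2 else 0))]
    by_cases h : 1 ≤ p.2 ∧ p.2 ≤ 9
    · have hb : pvBit p.2 = 1 <<< p.2.toNat := by simp [pvBit, h]
      simp only [pvColsStep, if_pos h]
      rw [PySem.Dict.getD_insert]
      by_cases hk : p.1 = k
      · rw [if_pos (by omega : k = p.1), if_pos hk, hb]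
        simp [hk, Nat.lor_assoc]
      · rw [if_neg (fun h' => hk h'.symm), if_neg hk]
        simp [Nat.lor_assoc]
    · have hb : pvBit p.2 = 0 := by simp [pvBit, h]
      simp only [pvColsStep, if_neg h, hb]
      simp [Nat.lor_assoc]

theorem pv_boxesFold_getD (r : Int) (l : List (Int × Int))
    (boxes : PySem.Dict (Int × Int) Nat) (kb : Int × Int) :
    (l.foldl (pvBoxesStep r) boxes).getD kb 0
      = boxes.getD kb 0
        ||| l.foldl (fun m p => m ||| (if (PySem.Int.floordiv r 3, PySem.Int.floordiv p.1 3) = kb then pvBit p.2 else 0)) 0 := by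
  induction l generalizing boxes with
  | nil => simp
  | cons p ps ih =>
    simp only [List.foldl_cons]
    rw [ih]
    rw [pv_lor_out (fun m (q : Int × Int) => m ||| (if (PySem.Int.floordiv r 3, PySem.Int.floordiv q.1 3) = kb then pvBit q.2 else 0)) _
      (fun _ _ => rfl) ps (0 ||| (if (PySem.Int.floordiv r 3, PySem.Int.floordiv p.1 3) = kb then pvBit p.2 else 0))]
    by_cases h : 1 ≤ p.2 ∧ p.2 ≤ 9
    · have hb : pvBit p.2 = 1 <<< p.2.toNat := by simp [pvBit, h]
      simp only [pvBoxesStep, if_pos h]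
      rw [PySem.Dict.getD_insert]
      by_cases hk : (PySem.Int.floordiv r 3, PySem.Int.floordiv p.1 3) = kb
      · rw [if_pos hk.symm, if_pos hk, hb, hk]
        simp [Nat.lor_assoc]
      · rw [if_neg (fun h' => hk h'.symm), if_neg hk]
        simp [Nat.lor_assoc]
    · have hb : pvBit p.2 = 0 := by simp [pvBit, h]
      simp only [pvBoxesStep, if_neg h, hb]
      simp [Nat.lor_assoc]

theorem pv_rowMask_enum (row : List Int) :
    (PySem.List.enumerate row 0).foldl (fun m p => m ||| pvBit p.2) 0 = pvRowMask row := by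
  unfold pvRowMask
  conv_rhs => rw [← PySem.List.map_snd_enumerate row 0]
  rw [List.foldl_map]

theorem pv_outer_char (l : List (Int × List Int))
    (ok : Bool) (cols : PySem.Dict Int Nat) (boxes : PySem.Dict (Int × Int) Nat) :
    l.foldl altOuterStep (ok, cols, boxes)
      = (ok && l.all (fun rp => pvRowMask rp.2 == 1022),
         l.foldl (fun d rp => (PySem.List.enumerate rp.2 0).foldl pvColsStep d) cols,
         l.foldl (fun d rp => (PySem.List.enumerate rp.2 0).foldl (pvBoxesStep rp.1) d) boxes) := by
  induction l generalizing ok cols boxes with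
  | nil => simp
  | cons rp ps ih =>
    simp only [List.foldl_cons, altOuterStep]
    rw [pv_inner_char, ih]
    simp only [pv_rowMask_enum, List.all_cons, Bool.and_assoc]
    simp

theorem pv_outer_cols_getD (l : List (Int × List Int)) (cols : PySem.Dict Int Nat) (k : Int) :
    (l.foldl (fun d rp => (PySem.List.enumerate rp.2 0).foldl pvColsStep d) cols).getD k 0
      = cols.getD k 0 ||| l.foldl (fun m rp => m ||| pvColAcc k rp.2) 0 := by
  induction l generalizing cols with
  | nil => simp
  | cons rp ps ih =>
    simp only [List.foldl_cons]
    rw [ih, pv_colsFold_getD]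
    rw [pv_lor_out (fun m (rp : Int × List Int) => m ||| pvColAcc k rp.2) _
      (fun _ _ => rfl) ps (0 ||| pvColAcc k rp.2)]
    simp only [pvColAcc]
    simp [Nat.lor_assoc]

theorem pv_outer_boxes_getD (l : List (Int × List Int))
    (boxes : PySem.Dict (Int × Int) Nat) (kb : Int × Int) :
    (l.foldl (fun d rp => (PySem.List.enumerate rp.2 0).foldl (pvBoxesStep rp.1) d) boxes).getD kb 0
      = boxes.getD kb 0 ||| l.foldl (fun m rp => m ||| pvBoxAcc kb rp.1 rp.2) 0 := by
  induction l generalizing boxes with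
  | nil => simp
  | cons rp ps ih =>
    simp only [List.foldl_cons]
    rw [ih, pv_boxesFold_getD]
    rw [pv_lor_out (fun m (rp : Int × List Int) => m ||| pvBoxAcc kb rp.1 rp.2) _
      (fun _ _ => rfl) ps (0 ||| pvBoxAcc kb rp.1 rp.2)]
    simp only [pvBoxAcc]
    simp [Nat.lor_assoc]

theorem pv_alt_eq (data : List (List Int)) :
    gewonnen_alt data
      = (data.all (fun row => pvRowMask row == 1022)
         && (PySem.List.pyRange 0 9 1).all (fun c => pvColMask data c == 1022)
         && (PySem.List.pyRange 0 3 1).all (fun x =>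
              (PySem.List.pyRange 0 3 1).all (fun y => pvBoxMask data (x, y) == 1022))) := by
  unfold gewonnen_alt
  rw [pv_outer_char]
  have hall : (PySem.List.enumerate data 0).all (fun rp => pvRowMask rp.2 == 1022)
      = data.all (fun row => pvRowMask row == 1022) := by
    conv_rhs => rw [← PySem.List.map_snd_enumerate data 0]
    rw [List.all_map]
    simp [Function.comp_def]
  have hcols : ∀ k : Int,
      ((PySem.List.enumerate data 0).foldl
        (fun d rp => (PySem.List.enumerate rp.2 0).foldl pvColsStep d) PySem.Dict.empty).getD k 0
      = pvColMask data k := by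
    intro k
    rw [pv_outer_cols_getD]
    unfold pvColMask
    conv_rhs => rw [← PySem.List.map_snd_enumerate data 0]
    rw [List.foldl_map]
    simp
  have hboxes : ∀ kb : Int × Int,
      ((PySem.List.enumerate data 0).foldl
        (fun d rp => (PySem.List.enumerate rp.2 0).foldl (pvBoxesStep rp.1) d) PySem.Dict.empty).getD kb 0
      = pvBoxMask data kb := by
    intro kb
    rw [pv_outer_boxes_getD]
    unfold pvBoxMask
    simp
  simp only [hall, hcols, hboxes, Bool.true_and]

theorem pv_testBit_orFold {E : Type} (t : E → Nat) (l : List E) (a i : Nat) :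
    (l.foldl (fun m e => m ||| t e) a).testBit i
      = (a.testBit i || l.any (fun e => (t e).testBit i)) := by
  induction l generalizing a with
  | nil => simp
  | cons e es ih => simp [ih, Bool.or_assoc]

theorem pv_testBit_1022 (i : Nat) : (1022 : Nat).testBit i = decide (1 ≤ i ∧ i ≤ 9) := by
  rcases Nat.lt_or_ge i 10 with h | h
  · interval_cases i <;> decide
  · rw [Nat.testBit_lt_two_pow (by calc (1022:Nat) < 2 ^ 10 := by norm_num
        _ ≤ 2 ^ i := Nat.pow_le_pow_right (by norm_num) h)]
    simp; omega

theorem pv_testBit_pvBit (v : Int) (i : Nat) :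
    (pvBit v).testBit i = decide (1 ≤ v ∧ v ≤ 9 ∧ v = (i : Int)) := by
  unfold pvBit
  split_ifs with h
  · rw [Nat.one_shiftLeft, Nat.testBit_two_pow]
    simp only [decide_eq_decide]
    omega
  · simp [Nat.zero_testBit]; omega

theorem pv_mask_eq_1022 {E : Type} (t : E → Nat) (l : List E)
    (hb : ∀ e i, (t e).testBit i = true → 1 ≤ i ∧ i ≤ 9) :
    (l.foldl (fun m e => m ||| t e) 0 = 1022)
      ↔ (∀ i : Nat, 1 ≤ i → i ≤ 9 → l.any (fun e => (t e).testBit i) = true) := by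
  constructor
  · intro h i h1 h9
    have := congrArg (fun m => m.testBit i) h
    simp only [pv_testBit_orFold, Nat.zero_testBit, Bool.false_or, pv_testBit_1022] at this
    rw [this]; simp [h1, h9]
  · intro h
    apply Nat.eq_of_testBit_eq
    intro i
    rw [pv_testBit_orFold, pv_testBit_1022, Nat.zero_testBit, Bool.false_or]
    by_cases hi : 1 ≤ i ∧ i ≤ 9
    · simp [h i hi.1 hi.2, hi]
    · simp only [hi, decide_false]
      rw [List.any_eq_false]
      intro e he hcontra
      exact hi (hb e i hcontra)

theorem pv_testBit_ite (c : Prop) [Decidable c] (a : Nat) (i : Nat) :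
    (if c then a else 0).testBit i = (decide c && a.testBit i) := by
  split_ifs with h <;> simp [h, Nat.zero_testBit]

theorem pv_row_unit (row : List Int) :
    (pvRowMask row == 1022) = (PySem.List.pyRange 1 10 1).all (fun x => row.contains x) := by
  rw [Bool.eq_iff_iff, beq_iff_eq]
  unfold pvRowMask
  rw [pv_mask_eq_1022 pvBit row (fun v i h => by
        rw [pv_testBit_pvBit] at h
        have := of_decide_eq_true h
        omega)]
  simp only [List.all_eq_true, List.any_eq_true, pv_testBit_pvBit, decide_eq_true_eq,
    List.contains_iff_mem]
  constructor
  · intro h x hx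
    rcases PySem.List.mem_pyRange_one.mp hx with ⟨h1, h2⟩
    obtain ⟨v, hv, hg⟩ := h x.toNat (by omega) (by omega)
    have : v = x := by omega
    exact this ▸ hv
  · intro h i h1 h9
    refine ⟨(i : Int), h (i : Int) (PySem.List.mem_pyRange_one.mpr (by omega)), by omega⟩

theorem pv_spaltengen (data : List (List Int)) (y : Int) :
    spaltengenA data y = data.map (fun row => (PySem.List.pyGet? row y).getD 0) := by
  unfold spaltengenA
  rw [PySem.List.foldl_append_singleton_eq_map]
  rw [List.nil_append]

theorem pv_get_eq (row : List Int) (y t : Int) (ht : t ≠ 0) (hy : 0 ≤ y) :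
    ((PySem.List.pyGet? row y).getD 0 = t)
      ↔ ∃ (k : Nat) (_ : k < row.length), (k : Int) = y ∧ row[k] = t := by
  rw [PySem.List.pyGet?_of_nonneg row hy]
  by_cases h : y.toNat < row.length
  · rw [List.getElem?_eq_getElem h]
    simp only [Option.getD_some]
    constructor
    · intro he
      exact ⟨y.toNat, h, by omega, he⟩
    · rintro ⟨k, hk, hky, he⟩
      have : k = y.toNat := by omega
      subst this; exact he
  · rw [List.getElem?_eq_none (by omega)]
    simp only [Option.getD_none]
    constructor
    · intro h0; exact absurd h0.symm ht
    · rintro ⟨k, hk, hky, _⟩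
      omega

theorem pv_col_unit (data : List (List Int)) (y : Int) (hy : 0 ≤ y) :
    (pvColMask data y == 1022)
      = (PySem.List.pyRange 1 10 1).all (fun i => (spaltengenA data y).contains i) := by
  rw [Bool.eq_iff_iff, beq_iff_eq, pv_spaltengen]
  unfold pvColMask
  rw [pv_mask_eq_1022 (pvColAcc y) data (fun row i h => by
        unfold pvColAcc at h
        rw [pv_testBit_orFold] at h
        simp only [Nat.zero_testBit, Bool.false_or, List.any_eq_true] at h
        obtain ⟨p, _, hp⟩ := h
        rw [pv_testBit_ite, Bool.and_eq_true, pv_testBit_pvBit] at hp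
        have := of_decide_eq_true hp.2
        omega)]
  simp only [List.all_eq_true, List.any_eq_true, List.contains_iff_mem, List.mem_map]
  constructor
  · intro h x hx
    rcases PySem.List.mem_pyRange_one.mp hx with ⟨h1, h2⟩
    obtain ⟨row, hrow, hbit⟩ := h x.toNat (by omega) (by omega)
    unfold pvColAcc at hbit
    rw [pv_testBit_orFold] at hbit
    simp only [Nat.zero_testBit, Bool.false_or, List.any_eq_true] at hbit
    obtain ⟨p, hpmem, hp⟩ := hbit
    rw [pv_testBit_ite, Bool.and_eq_true, pv_testBit_pvBit] at hp
    have hc := of_decide_eq_true hp.1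
    have hv := of_decide_eq_true hp.2
    rw [PySem.List.mem_enumerate_iff] at hpmem
    obtain ⟨k, hk, hpk⟩ := hpmem
    refine ⟨row, hrow, ?_⟩
    rw [pv_get_eq row y x (by omega) hy]
    refine ⟨k, hk, ?_, ?_⟩
    · have : p.1 = (0 : Int) + k := by rw [hpk]
      omega
    · have : p.2 = row[k] := by rw [hpk]
      rw [← this]; omega
  · intro h i h1 h9
    obtain ⟨row, hrow, hval⟩ := h (i : Int) (PySem.List.mem_pyRange_one.mpr (by omega))
    rw [pv_get_eq row y (i : Int) (by omega) hy] at hval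
    obtain ⟨k, hk, hky, hkv⟩ := hval
    refine ⟨row, hrow, ?_⟩
    unfold pvColAcc
    rw [pv_testBit_orFold]
    simp only [Nat.zero_testBit, Bool.false_or, List.any_eq_true]
    refine ⟨((0 : Int) + k, row[k]), ?_, ?_⟩
    · rw [PySem.List.mem_enumerate_iff]
      exact ⟨k, hk, rfl⟩
    · rw [pv_testBit_ite, Bool.and_eq_true, pv_testBit_pvBit]
      constructor
      · simp only [decide_eq_true_eq]; omega
      · simp only [decide_eq_true_eq]; omega

theorem pv_subsec (g : Int → Int → Int) (x y : Int) :
    (PySem.List.pyRange (3*x) (3*x+3) 1).foldl (fun acc row =>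
      (PySem.List.pyRange (3*y) (3*y+3) 1).foldl (fun acc2 col => acc2 ++ [g row col]) acc) []
  = (PySem.List.pyRange 0 3 1).flatMap (fun r =>
      (PySem.List.pyRange 0 3 1).map (fun c => g (3*x+r) (3*y+c))) := by
  simp only [PySem.List.foldl_append_singleton_eq_map, PySem.List.foldl_append_eq_flatMap,
    List.nil_append]
  have hx : PySem.List.pyRange (3*x) (3*x+3) 1 = (PySem.List.pyRange 0 3 1).map (fun r => 3*x + r) := by
    simp [PySem.List.pyRange_one]
  have hy : PySem.List.pyRange (3*y) (3*y+3) 1 = (PySem.List.pyRange 0 3 1).map (fun c => 3*y + c) := by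
    simp [PySem.List.pyRange_one]
  rw [hx, hy, List.flatMap_map]
  simp [List.map_map, Function.comp_def]

theorem pv_fd3 (n : Nat) (x : Int) :
    PySem.Int.floordiv (n : Int) 3 = x ↔ 3*x ≤ (n : Int) ∧ (n : Int) < 3*x+3 := by
  rw [PySem.Int.floordiv_eq_iff_of_pos (by omega)]
  constructor <;> intro h <;> omega

theorem pv_cell_eq (data : List (List Int)) (a b t : Int) (ht : t ≠ 0) (ha : 0 ≤ a) (hb : 0 ≤ b) :
    ((PySem.List.pyGet? ((PySem.List.pyGet? data a).getD []) b).getD 0 = t)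
      ↔ ∃ (n : Nat) (_ : n < data.length), (n : Int) = a ∧
          ∃ (m : Nat) (_ : m < data[n].length), (m : Int) = b ∧ data[n][m] = t := by
  rw [PySem.List.pyGet?_of_nonneg data ha]
  by_cases h : a.toNat < data.length
  · rw [List.getElem?_eq_getElem h]
    simp only [Option.getD_some]
    rw [pv_get_eq data[a.toNat] b t ht hb]
    constructor
    · rintro ⟨m, hm, hmb, hv⟩
      exact ⟨a.toNat, h, by omega, m, hm, hmb, hv⟩
    · rintro ⟨n, hn, hna, m, hm, hmb, hv⟩
      have : n = a.toNat := by omega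
      subst this
      exact ⟨m, hm, hmb, hv⟩
  · rw [List.getElem?_eq_none (by omega)]
    simp only [Option.getD_none]
    constructor
    · intro h0
      simp only [PySem.List.pyGet?_of_nonneg ([] : List Int) hb] at h0
      simp at h0
      exact absurd h0.symm ht
    · rintro ⟨n, hn, hna, _⟩
      omega

theorem pv_box_unit (data : List (List Int)) (x y : Int) (hx : 0 ≤ x) (hy : 0 ≤ y) :
    (pvBoxMask data (x, y) == 1022) = subcheckA data x y := by
  unfold subcheckA
  rw [pv_subsec (fun row col => ((PySem.List.pyGet? ((PySem.List.pyGet? data row).getD []) col).getD 0)) x y]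
  rw [Bool.eq_iff_iff, beq_iff_eq]
  unfold pvBoxMask
  rw [pv_mask_eq_1022 (fun rp => pvBoxAcc (x, y) rp.1 rp.2) (PySem.List.enumerate data 0)
      (fun rp i h => by
        unfold pvBoxAcc at h
        rw [pv_testBit_orFold] at h
        simp only [Nat.zero_testBit, Bool.false_or, List.any_eq_true] at h
        obtain ⟨p, _, hp⟩ := h
        rw [pv_testBit_ite, Bool.and_eq_true, pv_testBit_pvBit] at hp
        have := of_decide_eq_true hp.2
        omega)]
  simp only [List.all_eq_true, List.any_eq_true, List.contains_iff_mem, List.mem_flatMap,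
    List.mem_map]
  constructor
  · intro h i hi
    rcases PySem.List.mem_pyRange_one.mp hi with ⟨h1, h2⟩
    obtain ⟨rp, hrp, hbit⟩ := h i.toNat (by omega) (by omega)
    rw [PySem.List.mem_enumerate_iff] at hrp
    obtain ⟨n, hn, rfl⟩ := hrp
    unfold pvBoxAcc at hbit
    rw [pv_testBit_orFold] at hbit
    simp only [Nat.zero_testBit, Bool.false_or, List.any_eq_true] at hbit
    obtain ⟨p, hpmem, hp⟩ := hbit
    rw [PySem.List.mem_enumerate_iff] at hpmem
    obtain ⟨m, hm, rfl⟩ := hpmem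
    rw [pv_testBit_ite, Bool.and_eq_true, pv_testBit_pvBit] at hp
    have hkey := of_decide_eq_true hp.1
    have hval := of_decide_eq_true hp.2
    simp only [zero_add, Prod.mk.injEq] at hkey hval
    obtain ⟨hfdn, hfdm⟩ := hkey
    rw [pv_fd3] at hfdn hfdm
    refine ⟨(n : Int) - 3*x, PySem.List.mem_pyRange_one.mpr (by omega),
            (m : Int) - 3*y, PySem.List.mem_pyRange_one.mpr (by omega), ?_⟩
    rw [show 3*x + ((n:Int) - 3*x) = (n:Int) by ring,
        show 3*y + ((m:Int) - 3*y) = (m:Int) by ring]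
    rw [pv_cell_eq data (n : Int) (m : Int) i (by omega) (by omega) (by omega)]
    refine ⟨n, hn, rfl, m, hm, rfl, ?_⟩
    rw [hval.2.2]
    omega
  · intro h i h1 h9
    obtain ⟨r', hr', c', hc', hval⟩ := h (i : Int) (PySem.List.mem_pyRange_one.mpr (by omega))
    rcases PySem.List.mem_pyRange_one.mp hr' with ⟨hr1, hr2⟩
    rcases PySem.List.mem_pyRange_one.mp hc' with ⟨hc1, hc2⟩
    rw [pv_cell_eq data (3*x+r') (3*y+c') (i : Int) (by omega) (by omega) (by omega)] at hval
    obtain ⟨n, hn, hna, m, hm, hmb, hv⟩ := hval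
    refine ⟨((0 : Int) + n, data[n]), ?_, ?_⟩
    · rw [PySem.List.mem_enumerate_iff]
      exact ⟨n, hn, rfl⟩
    · unfold pvBoxAcc
      rw [pv_testBit_orFold]
      simp only [Nat.zero_testBit, Bool.false_or, List.any_eq_true]
      refine ⟨((0 : Int) + m, data[n][m]), ?_, ?_⟩
      · rw [PySem.List.mem_enumerate_iff]
        exact ⟨m, hm, rfl⟩
      · rw [pv_testBit_ite, Bool.and_eq_true, pv_testBit_pvBit]
        refine ⟨?_, ?_⟩
        · simp only [decide_eq_true_eq, Prod.mk.injEq, zero_add]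
          exact ⟨by rw [pv_fd3]; omega, by rw [pv_fd3]; omega⟩
        · simp only [decide_eq_true_eq]
          rw [hv]
          omega

theorem pv_all_congr {α : Type} (l : List α) (f g : α → Bool)
    (h : ∀ x ∈ l, f x = g x) : l.all f = l.all g := by
  induction l with
  | nil => rfl
  | cons x xs ih => simp_all

theorem pv_shape (R C S : Bool) :
    (if R then (if C then (if S then true else false) else false) else false)
      = (R && C && S) := by
  cases R <;> cases C <;> cases S <;> rfl

-- ===== VERDICT (by name: the statement is the Claim_ definition above) =====
theorem gewonnen_spec : Claim_equal_gewonnen := by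
  intro data _
  show gewonnen data = gewonnen_alt data
  rw [pv_alt_eq]
  unfold gewonnen
  rw [pv_shape]
  congr 1
  · congr 1
    · exact pv_all_congr _ _ _ (fun row _ => (pv_row_unit row).symm)
    · refine pv_all_congr _ _ _ (fun y hy => ?_)
      have h0 : 0 ≤ y := by
        have := (PySem.List.mem_pyRange_one.mp hy); omega
      exact (pv_col_unit data y h0).symm
  · refine pv_all_congr _ _ _ (fun x hx => ?_)
    refine pv_all_congr _ _ _ (fun y hy => ?_)
    have h0x : 0 ≤ x := by have := (PySem.List.mem_pyRange_one.mp hx); omega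
    have h0y : 0 ≤ y := by have := (PySem.List.mem_pyRange_one.mp hy); omega
    rw [← pv_box_unit data x y h0x h0y]
    simp
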